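-- pv_equiv track=rewrite | github.com/Mgs25/Edabit_Challenges | stand_in_line.py | next_in_line
-- ===== SOURCE A (Python) =====
-- def next_in_line(lst, num):
--     if len(lst) != 0:
--         for i in range(len(lst)-1):
--             lst[i] = lst[i+1]
--         lst[len(lst)-1] = num
--     else:
--         return "No list has been selected"
--
--     return lst
-- ===== SOURCE B (Python) =====
-- def next_in_line(lst, num):
--     if len(lst) == 0:
--         return "No list has been selected"
--     lst.pop(0)
--     lst.append(num)
--     return lst
-- ===== Notes on version B (the rewrite author's own statement) =====
-- stated objective: faster
-- what changed: B treats the list as a FIFO queue (C-level pop(0) then append(num)) instead of A's Python-level index-by-index shifting loop, removing the per-element interpreted assignments.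
-- outside the precondition, e.g. on next_in_line([], 5): A returns 'No list has been selected', B returns 'No list has been selected'
import Mathlib
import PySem

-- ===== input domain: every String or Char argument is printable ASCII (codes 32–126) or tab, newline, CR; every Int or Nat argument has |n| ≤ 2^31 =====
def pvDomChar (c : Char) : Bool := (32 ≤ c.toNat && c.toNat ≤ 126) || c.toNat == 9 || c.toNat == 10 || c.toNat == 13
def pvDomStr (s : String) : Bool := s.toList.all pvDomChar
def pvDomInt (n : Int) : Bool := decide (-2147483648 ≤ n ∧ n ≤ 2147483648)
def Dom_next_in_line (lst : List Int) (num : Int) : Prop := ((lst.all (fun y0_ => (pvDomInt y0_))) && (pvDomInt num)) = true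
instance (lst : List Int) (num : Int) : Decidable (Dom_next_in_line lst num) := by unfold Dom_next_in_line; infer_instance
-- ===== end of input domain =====

-- B replaces A's manual index-shifting loop with FIFO-queue operations (pop front, append num); the
-- equivalence proved is about the RETURN value only (both Pythons also mutate the argument in place).

-- ===== PORT A =====
-- for-loop over range(len(lst)-1) shifting each element left, then assignment to the last slot
def next_in_line (lst : List Int) (num : Int) : List Int :=
  if lst.length ≠ 0 then
    let shifted := (PySem.List.pyRange 0 ((lst.length : Int) - 1) 1).foldl
      (fun acc i => acc.set i.toNat (PySem.List.pyGetD acc (i + 1) 0)) lst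
    shifted.set (lst.length - 1) num
  else []  -- Python returns the string "No list has been selected" here; excluded by Pre_

-- ===== PORT B =====
-- pop(0) discards the head, append(num) adds at the back
def next_in_line_alt (lst : List Int) (num : Int) : List Int :=
  match lst with
  | [] => []  -- Python returns the sentinel string here; excluded by Pre_
  | _ :: rest => rest ++ [num]

-- ===== PRECONDITION & SPEC =====
-- Pre_ excludes only the empty list, on which both Pythons return the string
-- "No list has been selected", which is not a value of the declared List Int type.
def Pre_next_in_line (lst : List Int) (num : Int) : Prop := lst ≠ []
instance (lst : List Int) (num : Int) : Decidable (Pre_next_in_line lst num) := by unfold Pre_next_in_line; infer_instance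
def pvWitness_next_in_line : List Int × Int := ([3, 7, 2], 5)
def Spec_next_in_line (lst : List Int) (num : Int) (out : List Int) : Prop := out = next_in_line_alt lst num
instance (lst : List Int) (num : Int) (out : List Int) : Decidable (Spec_next_in_line lst num out) := by unfold Spec_next_in_line; infer_instance

-- ===== CLAIM (what is proved, stated in full; the proofs are below) =====
def Claim_equal_next_in_line : Prop := ∀ (lst : List Int) (num : Int), Dom_next_in_line lst num → Pre_next_in_line lst num → Spec_next_in_line lst num (next_in_line lst num)

-- ===== LEMMAS AND PROOFS =====

-- the shift loop of A, with Nat indices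
def pvShift (acc : List Int) (n : Nat) : List Int :=
  (List.range n).foldl (fun a k => a.set k (a.getD (k + 1) 0)) acc

theorem pvShift_succ (acc : List Int) (n : Nat) :
    pvShift acc (n + 1) = (pvShift acc n).set n ((pvShift acc n).getD (n + 1) 0) := by
  simp [pvShift, List.range_succ]

theorem pvShift_length (n : Nat) (acc : List Int) : (pvShift acc n).length = acc.length := by
  induction n with
  | zero => simp [pvShift]
  | succ m ih => rw [pvShift_succ]; simp [ih]

theorem pvShift_getD (acc : List Int) (n : Nat) (hn : n < acc.length) : ∀ (j : Nat),
    (pvShift acc n).getD j 0 = if j < n then acc.getD (j + 1) 0 else acc.getD j 0 := by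
  induction n with
  | zero => simp [pvShift]
  | succ m ih =>
    intro j
    have hm : m < acc.length := by omega
    rw [pvShift_succ]
    rw [List.getD_eq_getElem?_getD, List.getElem?_set]
    by_cases hjm : m = j
    · subst hjm
      simp only [pvShift_length, hm, if_pos, List.getD_eq_getElem?_getD] at *
      have := ih hm (m + 1)
      rw [if_neg (by omega)] at this
      simp [this]
    · rw [if_neg hjm, ← List.getD_eq_getElem?_getD, ih hm j]
      by_cases h1 : j < m
      · rw [if_pos h1, if_pos (by omega)]
      · rw [if_neg h1, if_neg (by omega)]

-- A's foldl over pyRange is pvShift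
theorem pvPort_eq_shift (lst : List Int) (num : Int) (h : lst ≠ []) :
    next_in_line lst num = (pvShift lst (lst.length - 1)).set (lst.length - 1) num := by
  have hlen : lst.length ≠ 0 := by simpa using h
  unfold next_in_line
  rw [if_pos hlen]
  refine congrArg (fun l => List.set l (lst.length - 1) num) ?_
  rw [PySem.List.pyRange_one, List.foldl_map]
  have hcast : (((lst.length : Int) - 1) - 0).toNat = lst.length - 1 := by omega
  rw [hcast, pvShift]
  have hf : (fun (a : List Int) (k : Nat) =>
      a.set ((0 : Int) + (k : Int)).toNat (PySem.List.pyGetD a (((0 : Int) + (k : Int)) + 1) 0)) =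
      (fun (a : List Int) (k : Nat) => a.set k (a.getD (k + 1) 0)) := by
    funext a k
    rw [show ((0 : Int) + (k : Int)) + 1 = (((k + 1 : Nat)) : Int) by push_cast; ring,
        PySem.List.pyGetD_natCast]
    simp
  rw [hf]

theorem next_in_line_spec : Claim_equal_next_in_line := by
  intro lst num _ hpre
  unfold Spec_next_in_line
  match lst, hpre with
  | a :: rest, _ =>
    rw [pvPort_eq_shift (a :: rest) num (by simp)]
    have hL : (a :: rest).length - 1 = rest.length := by simp
    apply List.ext_getElem
    · simp [pvShift_length, next_in_line_alt]
    · intro j hj1 hj2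
      simp only [next_in_line_alt] at hj2 ⊢
      have hjL : j < rest.length + 1 := by
        simpa [pvShift_length] using hj1
      rw [List.getElem_set]
      by_cases hje : (a :: rest).length - 1 = j
      · have hj : j = rest.length := by simp at hje; omega
        rw [if_pos hje]
        rw [List.getElem_append_right (by omega)]
        simp [hj]
      · rw [if_neg hje]
        have hjr : j < rest.length := by simp at hje; omega
        have h1 : (pvShift (a :: rest) ((a :: rest).length - 1))[j]'(by
            rw [pvShift_length]; simpa using hjL) =
            (pvShift (a :: rest) ((a :: rest).length - 1)).getD j 0 := by
          rw [List.getD_eq_getElem]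
        rw [h1, pvShift_getD (a :: rest) _ (by simp) j, hL, if_pos hjr]
        rw [List.getElem_append_left hjr]
        rw [List.getD_eq_getElem (a :: rest) 0 (by simp; omega)]
        simp
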